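-- pv_equiv track=rewrite | github.com/Fowleyy/FAI-SWI | Druhák/kryptologie/afinní_šifra.py | sifruj
-- ===== SOURCE A (Python) =====
-- from math import gcd
-- import unicodedata
-- import string
--
-- def odstranit_diakritiku(text):
--     text_bez_diakritiky = ''.join(
--         (c for c in unicodedata.normalize('NFD', text) if unicodedata.category(c) != 'Mn')
--     )
--     text_bez_znaku = ''.join(c for c in text_bez_diakritiky if c.isalnum() or c.isspace())
--
--     return text_bez_znaku
--
-- def sifruj(text, a, b):
--     if gcd(a, 26) != 1:
--         raise ValueError("Hodnoty klíčů musí být nesoudělné s 26.")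
--
--     abeceda = string.ascii_uppercase
--     cisla = string.digits
--     text = odstranit_diakritiku(text).upper()
--
--     sifrovany_text = []
--     mezery_pozice = []
--
--     for i, znak in enumerate(text):
--         if znak in abeceda:
--             index = abeceda.index(znak)
--             sifrovany_znak = abeceda[(a * index + b) % 26]
--             sifrovany_text.append(sifrovany_znak)
--
--         elif znak in cisla:
--             index = cisla.index(znak)
--             sifrovany_znak = cisla[(a * index + b) % 10]
--             sifrovany_text.append(sifrovany_znak)
--
--         elif znak == " ":
--             mezery_pozice.append(i)
--
--         else:
--             sifrovany_text.append(znak)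
--
--
--     sifrovany_text_str = ''.join(sifrovany_text)
--
--     rozdeleny_text = ' '.join([sifrovany_text_str[i:i+5] for i in range(0, len(sifrovany_text_str), 5)])
--
--     return rozdeleny_text, mezery_pozice
-- ===== SOURCE B (Python) =====
-- from math import gcd
-- import unicodedata
-- import string
--
--
-- def odstranit_diakritiku(text):
--     text_bez_diakritiky = ''.join(
--         (c for c in unicodedata.normalize('NFD', text) if unicodedata.category(c) != 'Mn')
--     )
--     return ''.join(c for c in text_bez_diakritiky if c.isalnum() or c.isspace())
--
--
-- def sifruj(text, a, b):
--     if gcd(a, 26) != 1: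
--         raise ValueError("Hodnoty klíčů musí být nesoudělné s 26.")
--
--     abeceda = string.ascii_uppercase
--     cisla = string.digits
--     t = odstranit_diakritiku(text).upper()
--
--     # word-based pipeline: split on spaces once, then work per word
--     slova = t.split(' ')
--
--     # space positions reconstructed from cumulative word lengths
--     mezery_pozice = []
--     pozice = 0
--     for slovo in slova[:-1]:
--         pozice += len(slovo)
--         mezery_pozice.append(pozice)
--         pozice += 1
--
--     # affine image by code-point arithmetic (no alphabet scan)
--     def zasifruj_znak(c):
--         if 'A' <= c <= 'Z':
--             return abeceda[(a * (ord(c) - ord('A')) + b) % 26]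
--         if '0' <= c <= '9':
--             return cisla[(a * (ord(c) - ord('0')) + b) % 10]
--         return c
--
--     s = ''.join(zasifruj_znak(c) for slovo in slova for c in slovo)
--
--     # regroup into blocks of five by peeling from the front
--     bloky = []
--     while s:
--         bloky.append(s[:5])
--         s = s[5:]
--     return ' '.join(bloky), mezery_pozice
-- ===== Notes on version B (the rewrite author's own statement) =====
-- stated objective: alternative
-- what changed: B replaces A's single indexed pass (per-character if/elif chain with .index alphabet scans, space indices collected in-loop, range-slice regrouping) by a word-based pipeline: split the normalized text on spaces once, reconstruct the space positions from cumulative word lengths, encrypt by code-point arithmetic over the flattened words, and regroup by peeling five-character blocks off the front.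
import Mathlib
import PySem

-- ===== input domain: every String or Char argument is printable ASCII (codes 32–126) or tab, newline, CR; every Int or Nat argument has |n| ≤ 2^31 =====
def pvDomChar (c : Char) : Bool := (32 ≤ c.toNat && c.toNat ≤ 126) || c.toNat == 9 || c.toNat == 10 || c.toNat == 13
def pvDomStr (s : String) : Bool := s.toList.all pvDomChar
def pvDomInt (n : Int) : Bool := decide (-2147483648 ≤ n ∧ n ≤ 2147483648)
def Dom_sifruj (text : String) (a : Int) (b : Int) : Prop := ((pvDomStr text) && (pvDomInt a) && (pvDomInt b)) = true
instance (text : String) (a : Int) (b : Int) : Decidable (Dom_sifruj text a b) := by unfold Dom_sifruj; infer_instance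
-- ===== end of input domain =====

-- B replaces A's single indexed pass (.index scans, in-loop space tracking, range-slice
-- grouping) by a word-based pipeline: split on spaces, positions from cumulative word
-- lengths, code-point-arithmetic cipher over the flattened words, peel-off grouping
-- (objective: alternative).


-- ===== shared helpers (identical lines of Python in A and B) =====
-- string.ascii_uppercase / string.digits
def pvAbeceda : List Char :=
  ['A','B','C','D','E','F','G','H','I','J','K','L','M','N','O','P','Q','R','S','T','U','V','W','X','Y','Z']
def pvCisla : List Char := ['0','1','2','3','4','5','6','7','8','9']

-- odstranit_diakritiku: on the printable-ASCII domain NFD is the identity and no 'Mn'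
-- characters occur, so it is the filter 'c.isalnum() or c.isspace()'; the two tests are
-- ported as the ASCII class tests below (exact on Dom: \x0b/\x0c are outside Dom).
def pvKeep (c : Char) : Bool :=
  ((decide ('0' ≤ c) && decide (c ≤ '9')) || (decide ('A' ≤ c) && decide (c ≤ 'Z'))
    || (decide ('a' ≤ c) && decide (c ≤ 'z')))
  || (c == ' ' || c == '\t' || c == '\n' || c == '\r')

def pvOdstranit (cs : List Char) : List Char := cs.filter pvKeep

-- ===== PORT A =====
-- the body of A's 'for i, znak in enumerate(text)' loop
def pvStepA (a b : Int) (acc : List Char × List Int) (p : Int × Char) : List Char × List Int :=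
  if pvAbeceda.contains p.2 then
    let index : Nat := (PySem.List.index? pvAbeceda p.2).getD 0  -- .index, guarded by the membership test
    (acc.1 ++ [PySem.List.pyGetD pvAbeceda (PySem.Int.mod (a * index + b) 26) ' '], acc.2)
  else if pvCisla.contains p.2 then
    let index : Nat := (PySem.List.index? pvCisla p.2).getD 0
    (acc.1 ++ [PySem.List.pyGetD pvCisla (PySem.Int.mod (a * index + b) 10) ' '], acc.2)
  else if p.2 == ' ' then (acc.1, acc.2 ++ [p.1])
  else (acc.1 ++ [p.2], acc.2)

-- ' '.join([s[i:i+5] for i in range(0, len(s), 5)])  (A's grouping line)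
def pvGroup5 (s : List Char) : List Char :=
  PySem.Chars.join [' ']
    ((PySem.List.pyRange 0 (PySem.List.len s) 5).map
      (fun i => PySem.List.slice s (some i) (some (i + 5))))

def sifruj (text : String) (a : Int) (b : Int) : String × List Int :=
  -- 'if gcd(a, 26) != 1: raise ValueError' is excluded by Pre_sifruj
  let t := PySem.Chars.upper (pvOdstranit text.toList)
  let r := (PySem.List.enumerate t 0).foldl (pvStepA a b) ([], [])
  (String.ofList (pvGroup5 r.1), r.2)

-- ===== PORT B =====
-- def zasifruj_znak(c): affine image by code-point arithmetic (ord('A') = 65, ord('0') = 48)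
def pvZnak (a b : Int) (c : Char) : Char :=
  if 'A' ≤ c ∧ c ≤ 'Z' then
    PySem.List.pyGetD pvAbeceda (PySem.Int.mod (a * ((c.toNat : Int) - 65) + b) 26) ' '
  else if '0' ≤ c ∧ c ≤ '9' then
    PySem.List.pyGetD pvCisla (PySem.Int.mod (a * ((c.toNat : Int) - 48) + b) 10) ' '
  else c

-- the body of B's 'for slovo in slova[:-1]' loop: pozice += len; append pozice; pozice += 1
def pvKrok (st : Int × List Int) (slovo : List Char) : Int × List Int :=
  (st.1 + PySem.List.len slovo + 1, st.2 ++ [st.1 + PySem.List.len slovo])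

-- B's 'while s: bloky.append(s[:5]); s = s[5:]'
def pvBloky : List Char → List (List Char)
  | [] => []
  | c :: t =>
      PySem.List.slice (c :: t) none (some 5) :: pvBloky (PySem.List.slice (c :: t) (some 5) none)
  termination_by s => s.length
  decreasing_by
    have h5 : PySem.List.slice (c :: t) (some 5) none = List.drop 5 (c :: t) := by
      simpa using PySem.List.slice_from_natCast (c :: t) 5
    simp [h5]

def sifruj_alt (text : String) (a : Int) (b : Int) : String × List Int :=
  -- the gcd ValueError guard, excluded by Pre_sifruj
  let t := PySem.Chars.upper (pvOdstranit text.toList)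
  let slova := PySem.Chars.splitOn t [' ']                                  -- t.split(' ')
  let mez := ((PySem.List.slice slova none (some (-1))).foldl pvKrok (0, [])).2  -- slova[:-1] loop
  let s := slova.flatMap (fun slovo => slovo.map (pvZnak a b))              -- join of the generator
  (String.ofList (PySem.Chars.join [' '] (pvBloky s)), mez)

-- ===== PRECONDITION & SPEC =====
-- Pre_ excludes exactly the keys with gcd(a, 26) ≠ 1, on which both Pythons raise ValueError.
def Pre_sifruj (text : String) (a : Int) (b : Int) : Prop := Int.gcd a 26 = 1
instance (text : String) (a : Int) (b : Int) : Decidable (Pre_sifruj text a b) := by unfold Pre_sifruj; infer_instance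

def pvWitness_sifruj : String × Int × Int := ("AHOJ SVETE 123", 3, 5)

def Spec_sifruj (text : String) (a : Int) (b : Int) (out : String × List Int) : Prop := out = sifruj_alt text a b
instance (text : String) (a : Int) (b : Int) (out : String × List Int) : Decidable (Spec_sifruj text a b out) := by unfold Spec_sifruj; infer_instance

-- ===== CLAIM (what is proved, stated in full; the proofs are below) =====
def Claim_equal_sifruj : Prop := ∀ (text : String) (a : Int) (b : Int), Dom_sifruj text a b → Pre_sifruj text a b → Spec_sifruj text a b (sifruj text a b)

-- ===== LEMMAS AND PROOFS =====

-- A's per-character branch chain, as a function (used only in the proofs)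
def pvEncA (a b : Int) (c : Char) : Char :=
  if pvAbeceda.contains c then
    PySem.List.pyGetD pvAbeceda
      (PySem.Int.mod (a * ((PySem.List.index? pvAbeceda c).getD 0 : Nat) + b) 26) ' '
  else if pvCisla.contains c then
    PySem.List.pyGetD pvCisla
      (PySem.Int.mod (a * ((PySem.List.index? pvCisla c).getD 0 : Nat) + b) 10) ' '
  else c

-- simple recursion computing text.split(' ') (proof-side model of Chars.splitOn)
def pvSplitSp : List Char → List (List Char)
  | [] => [[]]
  | c :: t => if c == ' ' then [] :: pvSplitSp t else (pvSplitSp t).modifyHead (c :: ·)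

theorem pvSplitSp_ne_nil (cs : List Char) : pvSplitSp cs ≠ [] := by
  induction cs with
  | nil => simp [pvSplitSp]
  | cons c t ih =>
      by_cases h : c == ' ' <;> simp [pvSplitSp, h]
      cases hw : pvSplitSp t with
      | nil => exact absurd hw ih
      | cons w ws => simp

theorem pvGo_space (cs : List Char) : ∀ (fuel : Nat) (cur : List Char) (acc : List (List Char)),
    cs.length < fuel →
    PySem.Chars.splitOn.go [' '] fuel cs cur acc
      = acc.reverse ++ (pvSplitSp cs).modifyHead (cur.reverse ++ ·) := by
  induction cs with
  | nil =>
      intro fuel cur acc h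
      cases fuel with
      | zero => omega
      | succ n => simp [PySem.Chars.splitOn.go, pvSplitSp]
  | cons c t ih =>
      intro fuel cur acc h
      cases fuel with
      | zero => omega
      | succ n =>
          by_cases hc : c = ' '
          · subst hc
            rw [show PySem.Chars.splitOn.go [' '] (n+1) (' ' :: t) cur acc
                  = PySem.Chars.splitOn.go [' '] n t [] (cur.reverse :: acc) from by
                simp [PySem.Chars.splitOn.go, List.isPrefixOf]]
            rw [ih n [] (cur.reverse :: acc) (by simpa using h)]
            simp only [pvSplitSp, beq_self_eq_true, if_pos, List.reverse_cons, List.reverse_nil,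
              List.nil_append, List.modifyHead]
            cases pvSplitSp t <;> simp
          · rw [show PySem.Chars.splitOn.go [' '] (n+1) (c :: t) cur acc
                  = PySem.Chars.splitOn.go [' '] n t (c :: cur) acc from by
                simp [PySem.Chars.splitOn.go, List.isPrefixOf]
                intro h; exact absurd h.symm hc]
            rw [ih n (c :: cur) acc (by simpa using h)]
            simp only [pvSplitSp, beq_iff_eq, hc, if_neg, not_false_iff]
            cases hw : pvSplitSp t with
            | nil => exact absurd hw (pvSplitSp_ne_nil t)
            | cons w ws => simp

theorem pvSplitOn_space (cs : List Char) : PySem.Chars.splitOn cs [' '] = pvSplitSp cs := by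
  rw [show PySem.Chars.splitOn cs [' '] = PySem.Chars.splitOn.go [' '] (cs.length + 1) cs [] []
        from rfl]
  rw [pvGo_space cs (cs.length + 1) [] [] (by omega)]
  cases hw : pvSplitSp cs with
  | nil => exact absurd hw (pvSplitSp_ne_nil cs)
  | cons w ws => simp

-- prepending a character to the first word shifts the position loop by one
theorem pvKrok_shift (ws : List (List Char)) (hne : ws ≠ []) (c : Char) (pos : Int) (acc : List Int) :
    ((ws.modifyHead (c :: ·)).dropLast.foldl pvKrok (pos, acc)).2
      = (ws.dropLast.foldl pvKrok (pos + 1, acc)).2 := by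
  cases ws with
  | nil => exact absurd rfl hne
  | cons w rest =>
      cases rest with
      | nil => simp
      | cons w2 rest2 =>
          simp only [List.modifyHead, List.dropLast, List.foldl_cons]
          have : pvKrok (pos, acc) (c :: w) = pvKrok (pos + 1, acc) w := by
            simp [pvKrok, PySem.List.len, Prod.ext_iff]
            omega
          rw [this]

-- the position loop over slova[:-1] computes the indices of the spaces
theorem pvPos_eq (cs : List Char) : ∀ (pos : Int) (acc : List Int),
    ((pvSplitSp cs).dropLast.foldl pvKrok (pos, acc)).2
      = acc ++ ((PySem.List.enumerate cs pos).filter (fun p => p.2 == ' ')).map (·.1) := by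
  induction cs with
  | nil => intro pos acc; simp [pvSplitSp, PySem.List.enumerate_nil]
  | cons c t ih =>
      intro pos acc
      rw [PySem.List.enumerate_cons]
      by_cases hc : c = ' '
      · subst hc
        simp only [pvSplitSp, beq_self_eq_true, if_pos]
        cases hw : pvSplitSp t with
        | nil => exact absurd hw (pvSplitSp_ne_nil t)
        | cons w ws =>
            rw [← hw]
            have : ([] :: pvSplitSp t).dropLast = [] :: (pvSplitSp t).dropLast := by
              rw [hw]; simp
            rw [this]
            simp only [List.foldl_cons]
            have : pvKrok (pos, acc) [] = (pos + 1, acc ++ [pos]) := by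
              simp [pvKrok, PySem.List.len]
            rw [this, ih (pos + 1) (acc ++ [pos])]
            simp
      · simp only [pvSplitSp, beq_iff_eq, hc, if_neg, not_false_iff]
        rw [pvKrok_shift (pvSplitSp t) (pvSplitSp_ne_nil t) c pos acc, ih (pos + 1) acc]
        simp [hc]

-- flattening the words and encrypting = encrypting the non-space characters
theorem pvFlat_eq (g : Char → Char) (cs : List Char) :
    (pvSplitSp cs).flatMap (fun w => w.map g)
      = (cs.filter (fun c => !(c == ' '))).map g := by
  induction cs with
  | nil => simp [pvSplitSp]
  | cons c t ih =>
      by_cases hc : c = ' '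
      · subst hc; simp [pvSplitSp, ih]
      · simp only [pvSplitSp, beq_iff_eq, hc, if_neg, not_false_iff]
        cases hw : pvSplitSp t with
        | nil => exact absurd hw (pvSplitSp_ne_nil t)
        | cons w ws =>
            rw [hw] at ih
            simp only [List.modifyHead, List.flatMap_cons, List.map_cons] at ih ⊢
            simp [hc, ← ih]

-- membership in the alphabet list ↔ the character range test
theorem pvMem_abeceda_iff (c : Char) : c ∈ pvAbeceda ↔ ('A' ≤ c ∧ c ≤ 'Z') := by
  constructor
  · intro h; fin_cases h <;> exact ⟨by decide, by decide⟩
  · rintro ⟨h1, h2⟩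
    have hl : 65 ≤ c.toNat := h1
    have hr : c.toNat ≤ 90 := h2
    have hc : c = Char.ofNat c.toNat := (Char.ofNat_toNat c).symm
    set n := c.toNat with hn
    interval_cases n <;> (rw [hc]; decide)

theorem pvMem_cisla_iff (c : Char) : c ∈ pvCisla ↔ ('0' ≤ c ∧ c ≤ '9') := by
  constructor
  · intro h; fin_cases h <;> exact ⟨by decide, by decide⟩
  · rintro ⟨h1, h2⟩
    have hl : 48 ≤ c.toNat := h1
    have hr : c.toNat ≤ 57 := h2
    have hc : c = Char.ofNat c.toNat := (Char.ofNat_toNat c).symm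
    set n := c.toNat with hn
    interval_cases n <;> (rw [hc]; decide)

-- A's branch chain and B's code-point arithmetic agree on every character
theorem pvEncA_eq_pvZnak (a b : Int) (c : Char) : pvEncA a b c = pvZnak a b c := by
  by_cases hA : pvAbeceda.contains c
  · have hm : c ∈ pvAbeceda := by simpa using hA
    fin_cases hm <;> rfl
  · by_cases hC : pvCisla.contains c
    · have hm : c ∈ pvCisla := by simpa using hC
      fin_cases hm <;> rfl
    · have h1 : ¬ ('A' ≤ c ∧ c ≤ 'Z') := by
        rw [← pvMem_abeceda_iff]; simpa using hA
      have h2 : ¬ ('0' ≤ c ∧ c ≤ '9') := by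
        rw [← pvMem_cisla_iff]; simpa using hC
      have hA' : c ∉ pvAbeceda := by simpa using hA
      have hC' : c ∉ pvCisla := by simpa using hC
      simp [pvEncA, pvZnak, hA', hC', h1, h2]

-- A's loop computes the encrypted characters and the space positions
theorem pvFold_eq (a b : Int) (cs : List Char) : ∀ (s : Int) (acc1 : List Char) (acc2 : List Int),
    (PySem.List.enumerate cs s).foldl (pvStepA a b) (acc1, acc2)
      = (acc1 ++ (cs.filter (fun c => !(c == ' '))).map (pvEncA a b),
         acc2 ++ ((PySem.List.enumerate cs s).filter (fun p => p.2 == ' ')).map (·.1)) := by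
  induction cs with
  | nil => intro s acc1 acc2; simp [PySem.List.enumerate_nil]
  | cons c t ih =>
      intro s acc1 acc2
      rw [PySem.List.enumerate_cons]
      by_cases hA : pvAbeceda.contains c
      · have hAm : c ∈ pvAbeceda := by simpa using hA
        have hs : ¬ (c == ' ') := by
          intro h; rw [show c = ' ' from by simpa using h] at hAm; simp [pvAbeceda] at hAm
        simp only [List.foldl_cons, pvStepA, hA, if_pos]
        rw [ih]
        simp [hs, pvEncA, hAm]
      · by_cases hC : pvCisla.contains c
        · have hCm : c ∈ pvCisla := by simpa using hC
          have hs : ¬ (c == ' ') := by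
            intro h; rw [show c = ' ' from by simpa using h] at hCm; simp [pvCisla] at hCm
          simp only [List.foldl_cons, pvStepA, hA, hC, if_neg, if_pos, Bool.false_eq_true,
            not_false_iff]
          rw [ih]
          have hAm' : c ∉ pvAbeceda := by simpa using hA
          simp [hs, pvEncA, hAm', hCm]
        · by_cases hs : c == ' '
          · simp only [List.foldl_cons, pvStepA, hA, hC, hs, Bool.false_eq_true, if_neg,
              not_false_iff, if_pos]
            rw [ih]
            simp [hs]
          · simp only [List.foldl_cons, pvStepA, hA, hC, hs, Bool.false_eq_true, if_neg,
              not_false_iff]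
            rw [ih]
            have hAm' : c ∉ pvAbeceda := by simpa using hA
            have hCm' : c ∉ pvCisla := by simpa using hC
            simp [hs, pvEncA, hAm', hCm']

-- A's range-slice grouping = B's peel-off grouping
def pvCnt (s : List Char) : Nat :=
  if (0 : Int) < (s.length : Int) then (((s.length : Int) + 4) / 5).toNat else 0

theorem pvSlice5 (s : List Char) (k : Nat) :
    PySem.List.slice s (some (0 + 5 * (k : Int))) (some (0 + 5 * (k : Int) + 5))
      = List.take 5 (List.drop (5 * k) s) := by
  rw [show (0 + 5 * (k : Int)) = ((5 * k : Nat) : Int) by push_cast; ring]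
  rw [show ((5 * k : Nat) : Int) + 5 = ((5 * k + 5 : Nat) : Int) by push_cast; ring]
  rw [PySem.List.slice_natCast]
  congr 1
  omega

theorem pvBloky_cons (c : Char) (t : List Char) :
    pvBloky (c :: t) = List.take 5 (c :: t) :: pvBloky (List.drop 5 (c :: t)) := by
  rw [pvBloky]
  congr 1
  · simpa using PySem.List.slice_to_natCast (c :: t) 5
  · congr 1
    simpa using PySem.List.slice_from_natCast (c :: t) 5

theorem pvCanon (s : List Char) :
    (PySem.List.pyRange 0 (PySem.List.len s) 5).map
      (fun i => PySem.List.slice s (some i) (some (i + 5)))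
      = (List.range (pvCnt s)).map (fun k => List.take 5 (List.drop (5 * k) s)) := by
  rw [PySem.List.pyRange_of_pos 0 (PySem.List.len s) (by norm_num), List.map_map]
  have h1 : (if (0 : Int) < PySem.List.len s then ((PySem.List.len s - 0 + 5 - 1) / 5).toNat else 0)
      = pvCnt s := by
    simp only [PySem.List.len, pvCnt]
    split_ifs <;> omega
  rw [h1]
  apply List.map_congr_left
  intro k _
  simpa using pvSlice5 s k

theorem pvCanon_eq (N : Nat) : ∀ (s : List Char), s.length ≤ N →
    (List.range (pvCnt s)).map (fun k => List.take 5 (List.drop (5 * k) s)) = pvBloky s := by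
  induction N with
  | zero =>
      intro s h
      have hs : s = [] := List.eq_nil_of_length_eq_zero (Nat.le_zero.mp h)
      subst hs
      simp [pvCnt, pvBloky]
  | succ N ih =>
      intro s h
      cases s with
      | nil => simp [pvCnt, pvBloky]
      | cons c t =>
          have hc : pvCnt (c :: t) = pvCnt (List.drop 5 (c :: t)) + 1 := by
            simp only [pvCnt, List.length_cons, List.length_drop]
            split_ifs <;> omega
          rw [hc, List.range_succ_eq_map, List.map_cons, List.map_map, pvBloky_cons]
          congr 1
          have hlen : (List.drop 4 t).length ≤ N := by
            simp only [List.length_drop]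
            simp only [List.length_cons] at h
            omega
          rw [show pvBloky (List.drop 5 (c :: t)) = pvBloky (List.drop 4 t) from rfl,
              ← ih (List.drop 4 t) hlen]
          apply List.map_congr_left
          intro k _
          simp only [Function.comp_apply, Nat.succ_eq_add_one, List.drop_drop]
          rw [show 5 * (k + 1) = (5 * k + 4) + 1 from by omega, List.drop_succ_cons]
          congr 2
          omega

theorem pvGroups_eq (s : List Char) :
    (PySem.List.pyRange 0 (PySem.List.len s) 5).map
      (fun i => PySem.List.slice s (some i) (some (i + 5))) = pvBloky s := by
  rw [pvCanon]
  exact pvCanon_eq s.length s (le_refl _)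

-- ===== VERDICT (by name: the statement is the Claim_ definition above) =====
theorem sifruj_spec : Claim_equal_sifruj := by
  intro text a b _ _
  unfold Spec_sifruj
  simp only [sifruj, sifruj_alt]
  rw [pvFold_eq, pvSplitOn_space, PySem.List.slice_to_neg_one, pvPos_eq, pvFlat_eq, pvGroup5,
    pvGroups_eq]
  simp [funext (pvEncA_eq_pvZnak a b)]
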